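-- pv_equiv track=rewrite | github.com/lsamec/myProjects | competetive_informatics_tasks/practice7.py | nextSum
-- ===== SOURCE A (Python) =====
-- def nextSum(previousSum, summed):
--     newSum = []
--     highestInt = None
--     indexes = list(range(0,len(previousSum)))
--     indexes.reverse()
--     for index in indexes:
--         if(previousSum[index] > 1):
--             newSum = previousSum[0:index]
--             newSum.append(previousSum[index]-1)
--             highestInt = previousSum[index]-1
--             break
--     while(sum(newSum) < summed):
--         currentSum = sum(newSum)
--         nextInt = highestInt
--         while(nextInt >= 1):
--             if nextInt+currentSum > summed:
--                 nextInt -= 1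
--             else:
--                 newSum.append(nextInt)
--                 break
--     return newSum
-- ===== SOURCE B (Python) =====
-- def nextSum(previousSum, summed):
--     # locate the rightmost element > 1 via a single left-to-right scan
--     cut = None
--     for i, v in enumerate(previousSum):
--         if v > 1:
--             cut = i
--     newSum = []
--     highestInt = None
--     if cut is not None:
--         highestInt = previousSum[cut] - 1
--         newSum = previousSum[:cut] + [highestInt]
--     remaining = summed - sum(newSum)
--     if remaining > 0:
--         q, r = divmod(remaining, highestInt)
--         newSum += [highestInt] * q
--         if r:
--             newSum.append(r)
--     return newSum
-- ===== Notes on version B (the rewrite author's own statement) =====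
-- stated objective: simpler
-- what changed: B finds the cut point with one forward scan and replaces A's nested repeated-subtraction while-loops (which append min(highestInt, remaining) one element at a time, re-summing the list each pass) by a single divmod: q copies of highestInt plus the remainder.
import Mathlib
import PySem

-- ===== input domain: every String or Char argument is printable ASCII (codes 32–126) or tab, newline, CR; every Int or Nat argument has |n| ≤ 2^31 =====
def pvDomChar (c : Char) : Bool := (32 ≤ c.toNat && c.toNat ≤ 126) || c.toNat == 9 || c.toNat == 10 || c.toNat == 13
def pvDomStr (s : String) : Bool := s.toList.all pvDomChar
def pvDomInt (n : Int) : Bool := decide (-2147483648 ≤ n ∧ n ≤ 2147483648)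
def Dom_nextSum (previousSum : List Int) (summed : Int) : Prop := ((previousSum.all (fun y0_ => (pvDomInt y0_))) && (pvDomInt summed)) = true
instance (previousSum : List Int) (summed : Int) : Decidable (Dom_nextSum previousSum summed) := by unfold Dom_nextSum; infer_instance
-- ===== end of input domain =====

-- B replaces A's nested repeated-subtraction while-loops by one divmod fill (and finds the
-- cut point by a single forward scan); objective: simpler. Return-value equivalence only.

-- ===== PORT A =====
-- termination measures of A's two while loops (named lemmas keep the port definitions small)
theorem pvInnerA_dec (a : Int) (h : a ≥ 1) : (a - 1).toNat < a.toNat := by omega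

-- inner 'while nextInt >= 1' loop of A: returns the value appended, none if the loop falls through
def pvInnerA (nextInt currentSum summed : Int) : Option Int :=
  if nextInt ≥ 1 then
    if nextInt + currentSum > summed then pvInnerA (nextInt - 1) currentSum summed
    else some nextInt
  else none
termination_by nextInt.toNat
decreasing_by exact pvInnerA_dec _ (by assumption)

-- the inner loop only returns values ≥ 1 that keep the sum ≤ summed (needed for termination of the outer loop)
theorem pvInnerA_bound (a c s n : Int) (h : pvInnerA a c s = some n) : 1 ≤ n ∧ n + c ≤ s := by
  fun_induction pvInnerA a c s with
  | case1 a h1 h2 ih => exact ih h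
  | case2 a h1 h2 => cases h; omega
  | case3 a h1 => cases h

theorem pvOuterA_dec (newSum : List Int) (n s : Int) (h : newSum.sum < s)
    (hb : 1 ≤ n ∧ n + newSum.sum ≤ s) :
    (s - (newSum ++ [n]).sum).toNat < (s - newSum.sum).toNat := by
  simp only [List.sum_append, List.sum_cons, List.sum_nil]
  omega

-- phase-1 'for index in indexes' loop of A (with break)
def pvScanA (p : List Int) : List Int → Option (List Int × Int)
  | [] => none
  | i :: rest =>
    if PySem.List.pyGetD p i 0 > 1 then
      some (PySem.List.slice p (some 0) (some i) ++ [PySem.List.pyGetD p i 0 - 1],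
            PySem.List.pyGetD p i 0 - 1)
    else pvScanA p rest

-- outer 'while sum(newSum) < summed' loop of A.  highestInt = none: the Python raises
-- TypeError (excluded by Pre_); pvInnerA = none: the Python loops forever (unreachable,
-- phase 1 always sets highestInt ≥ 1) — in both cases the port just stops.
def pvOuterA (newSum : List Int) (highestInt : Option Int) (summed : Int) : List Int :=
  if newSum.sum < summed then
    match highestInt with
    | none => newSum
    | some hi =>
      match hm : pvInnerA hi newSum.sum summed with
      | some n => pvOuterA (newSum ++ [n]) (some hi) summed
      | none => newSum
  else newSum
termination_by (summed - newSum.sum).toNat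
decreasing_by
  exact pvOuterA_dec _ _ _ (by assumption) (pvInnerA_bound _ _ _ _ hm)

def nextSum (previousSum : List Int) (summed : Int) : List Int :=
  match pvScanA previousSum ((PySem.List.pyRange 0 previousSum.length 1).reverse) with
  | some (ns, hi) => pvOuterA ns (some hi) summed
  | none => pvOuterA [] none summed

-- ===== PORT B =====
-- forward scan remembering the last index whose value exceeds 1
def pvCutB (p : List Int) : Option Int :=
  (PySem.List.enumerate p 0).foldl (fun acc iv => if iv.2 > 1 then some iv.1 else acc) none

def nextSum_alt (previousSum : List Int) (summed : Int) : List Int :=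
  match pvCutB previousSum with
  | some i =>
      let hi := PySem.List.pyGetD previousSum i 0 - 1
      let ns := PySem.List.slice previousSum none (some i) ++ [hi]
      let remaining := summed - ns.sum
      if remaining > 0 then
        match PySem.Int.divmod? remaining hi with
        | some (q, r) => ns ++ List.replicate q.toNat hi ++ (if r ≠ 0 then [r] else [])
        | none => ns            -- unreachable: hi ≥ 1 here
      else ns
  | none =>
      if summed - (0:Int) > 0 then []   -- the Python raises TypeError here (excluded by Pre_)
      else []

-- ===== PRECONDITION & SPEC =====
-- Pre_ excludes exactly the inputs on which A raises TypeError (no element > 1 to decrement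
-- and summed > 0: 'while nextInt >= 1' hits None); B raises the same TypeError there.
def Pre_nextSum (previousSum : List Int) (summed : Int) : Prop :=
  (∃ x ∈ previousSum, x > 1) ∨ summed ≤ 0
instance (previousSum : List Int) (summed : Int) : Decidable (Pre_nextSum previousSum summed) := by
  unfold Pre_nextSum; infer_instance

def pvWitness_nextSum : List Int × Int := ([2, 1], 4)

def Spec_nextSum (previousSum : List Int) (summed : Int) (out : List Int) : Prop := out = nextSum_alt previousSum summed
instance (previousSum : List Int) (summed : Int) (out : List Int) : Decidable (Spec_nextSum previousSum summed out) := by unfold Spec_nextSum; infer_instance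

-- ===== CLAIM (what is proved, stated in full; the proofs are below) =====
def Claim_equal_nextSum : Prop := ∀ (previousSum : List Int) (summed : Int), Dom_nextSum previousSum summed → Pre_nextSum previousSum summed → Spec_nextSum previousSum summed (nextSum previousSum summed)

-- ===== LEMMAS AND PROOFS =====
-- rightmost index k < n with p[k] > 1
def pvRm (p : List Int) : Nat → Option Nat
  | 0 => none
  | n + 1 => if p.getD n 0 > 1 then some n else pvRm p n

theorem pvRm_lt_of_some (p : List Int) (n k : Nat) (h : pvRm p n = some k) :
    k < n ∧ p.getD k 0 > 1 := by
  induction n with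
  | zero => cases h
  | succ n ih =>
    unfold pvRm at h
    split at h
    · cases h; omega
    · have := ih h; omega

theorem pvRm_none (p : List Int) (n k : Nat) (hk : k < n) (hv : p.getD k 0 > 1)
    (h : pvRm p n = none) : False := by
  induction n with
  | zero => omega
  | succ n ih =>
    unfold pvRm at h
    split at h
    · cases h
    · rcases Nat.lt_succ_iff_lt_or_eq.mp hk with h1 | h1
      · exact ih h1 h
      · subst h1; next hc => exact hc hv

theorem pvScanA_eq (p : List Int) (n : Nat) :
    pvScanA p ((PySem.List.pyRange 0 n 1).reverse) =
      (pvRm p n).map (fun (k : Nat) =>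
        (PySem.List.slice p (some 0) (some (k : Int)) ++ [p.getD k 0 - 1],
         p.getD k 0 - 1)) := by
  induction n with
  | zero => simp [pvScanA, pvRm, PySem.List.pyRange]
  | succ n ih =>
    have hr : PySem.List.pyRange 0 ((n : Int) + 1) 1 =
        PySem.List.pyRange 0 n 1 ++ [(n : Int)] := by
      simpa using PySem.List.pyRange_one_succ_right (a := 0) (b := (n : Int)) (by omega)
    push_cast
    rw [hr, List.reverse_append]
    simp only [List.reverse_cons, List.reverse_nil, List.nil_append, List.singleton_append]
    unfold pvScanA pvRm
    simp only [PySem.List.pyGetD_natCast]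
    split
    · simp
    · exact ih

theorem pvRm_append (p : List Int) (x : Int) (n : Nat) (hn : n ≤ p.length) :
    pvRm (p ++ [x]) n = pvRm p n := by
  induction n with
  | zero => rfl
  | succ n ih =>
    unfold pvRm
    rw [List.getD_append _ _ _ _ (by omega), ih (by omega)]

theorem pvRm_succ (p : List Int) (n : Nat) :
    pvRm p (n + 1) = if p.getD n 0 > 1 then some n else pvRm p n := rfl

theorem pvCutB_eq (p : List Int) : pvCutB p = (pvRm p p.length).map (fun (k : Nat) => (k : Int)) := by
  unfold pvCutB
  induction p using List.reverseRecOn with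
  | nil => rfl
  | append_singleton q x ih =>
    rw [PySem.List.enumerate_append, List.foldl_append, ih]
    simp only [PySem.List.enumerate_cons, PySem.List.enumerate_nil, List.foldl_cons, List.foldl_nil,
      List.length_append, List.length_cons, List.length_nil, Nat.zero_add]
    rw [pvRm_succ]
    rw [List.getD_append_right _ _ _ _ (by omega)]
    simp only [Nat.sub_self, List.getD_cons_zero]
    rw [pvRm_append q x q.length (le_refl _)]
    split
    · simp
    · rfl

-- the divmod fill, as one list
def pvFill (hi rem : Int) : List Int :=
  if 0 < rem then
    List.replicate (rem / hi).toNat hi ++ (if rem % hi ≠ 0 then [rem % hi] else [])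
  else []

theorem pvInnerA_eq (hi c s : Int) (h1 : 1 ≤ hi) (h2 : c < s) :
    pvInnerA hi c s = some (min hi (s - c)) := by
  fun_induction pvInnerA hi c s with
  | case1 a ha hb ih =>
    rw [ih (by omega)]
    congr 1
    omega
  | case2 a ha hb => congr 1; omega
  | case3 a ha => omega

theorem pvFill_step (hi rem : Int) (h1 : 1 ≤ hi) (h2 : 0 < rem) :
    pvFill hi rem = min hi rem :: pvFill hi (rem - min hi rem) := by
  by_cases hc : rem < hi
  · have hmin : min hi rem = rem := by omega
    have hd : rem / hi = 0 := Int.ediv_eq_zero_of_lt (by omega) hc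
    have hm : rem % hi = rem := Int.emod_eq_of_lt (by omega) hc
    have hne : rem ≠ 0 := by omega
    simp [pvFill, hmin, hd, hm, h2, hne]
  · have hmin : min hi rem = hi := by omega
    have hd : rem / hi = (rem - hi) / hi + 1 := by
      have h := Int.add_mul_ediv_right (rem - hi) 1 (by omega : hi ≠ 0)
      rw [one_mul, sub_add_cancel] at h
      exact h
    have hm : rem % hi = (rem - hi) % hi := by
      rw [Int.sub_emod, Int.emod_self, sub_zero, Int.emod_emod_of_dvd _ dvd_rfl]
    have hq0 : 0 ≤ (rem - hi) / hi := Int.ediv_nonneg (by omega) (by omega)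
    by_cases hz : 0 < rem - hi
    · simp only [pvFill, if_pos h2, if_pos hz, hd, hm, hmin]
      rw [(by omega : ((rem - hi) / hi + 1).toNat = ((rem - hi)/hi).toNat + 1)]
      simp [List.replicate_succ]
    · -- rem = hi exactly
      have he : rem = hi := by omega
      subst he
      simp only [min_self]
      rw [pvFill, if_pos h2, pvFill, if_neg (by omega : ¬ (0:Int) < rem - rem),
        Int.ediv_self (by omega : rem ≠ 0), Int.emod_self]
      simp

theorem pvOuterA_eq (s hi : Int) (h1 : 1 ≤ hi) (ns : List Int) :
    pvOuterA ns (some hi) s = ns ++ pvFill hi (s - ns.sum) := by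
  by_cases hlt : ns.sum < s
  · rw [pvOuterA, if_pos hlt, pvInnerA_eq hi ns.sum s h1 hlt]
    split
    · rename_i n hn
      injection hn with hn
      subst hn
      rw [pvOuterA_eq s hi h1 (ns ++ [min hi (s - ns.sum)])]
      rw [pvFill_step hi (s - ns.sum) h1 (by omega)]
      simp only [List.sum_append, List.sum_cons, List.sum_nil, List.append_assoc,
        List.singleton_append]
      rw [show s - (ns.sum + (min hi (s - ns.sum) + 0)) = s - ns.sum - min hi (s - ns.sum) by
        omega]
    · rename_i hn
      exact absurd hn (by simp)
  · rw [pvOuterA, if_neg hlt, pvFill, if_neg (by omega)]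
    simp
termination_by (s - ns.sum).toNat
decreasing_by simp only [List.sum_append, List.sum_cons, List.sum_nil]; omega

-- ===== VERDICT (by name: the statement is the Claim_ definition above) =====
theorem nextSum_spec : Claim_equal_nextSum := by
  intro p s _hd hpre
  unfold Spec_nextSum nextSum nextSum_alt
  rw [pvScanA_eq p p.length, pvCutB_eq p]
  cases hrm : pvRm p p.length with
  | none =>
    -- no element > 1: Pre_ forces s ≤ 0
    have hs : s ≤ 0 := by
      rcases hpre with ⟨x, hx, hx1⟩ | hs
      · obtain ⟨k, hk, rfl⟩ := List.getElem_of_mem hx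
        exact absurd (pvRm_none p p.length k hk (by rw [List.getD_eq_getElem _ _ hk]; omega) hrm)
          (fun h => h)
      · exact hs
    simp only [Option.map_none]
    rw [pvOuterA, if_neg (by simpa using (by omega : ¬ (0:Int) < s))]
    rw [if_neg (by omega)]
  | some k =>
    simp only [Option.map_some, PySem.List.pyGetD_natCast]
    have hk := pvRm_lt_of_some p p.length k hrm
    have hhi : (1:Int) ≤ p.getD k 0 - 1 := by omega
    set hi := p.getD k 0 - 1 with hhidef
    have hns : PySem.List.slice p (some 0) (some (k : Int)) =
        PySem.List.slice p none (some (k : Int)) := by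
      simp
    rw [hns]
    set ns := PySem.List.slice p none (some (k : Int)) ++ [hi] with hnsdef
    rw [pvOuterA_eq s hi hhi ns]
    by_cases hrem : s - ns.sum > 0
    · rw [if_pos hrem]
      have hne : hi ≠ 0 := by omega
      have h1' : (s - ns.sum).fdiv hi = (s - ns.sum) / hi := by
        have := PySem.Int.floordiv_eq_ediv_of_pos (a := s - ns.sum) (by omega : (0:Int) < hi)
        simpa [PySem.Int.floordiv] using this
      have h2' : (s - ns.sum).fmod hi = (s - ns.sum) % hi := by
        have := PySem.Int.mod_eq_emod_of_pos (a := s - ns.sum) (by omega : (0:Int) < hi)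
        simpa [PySem.Int.mod] using this
      have hdm : PySem.Int.divmod? (s - ns.sum) hi = some ((s - ns.sum) / hi, (s - ns.sum) % hi) := by
        simp [PySem.Int.divmod?, hne, h1', h2']
      rw [hdm]
      simp only [pvFill, if_pos hrem, List.append_assoc]
    · rw [if_neg hrem, pvFill, if_neg (by omega)]
      simp
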